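-- pv_equiv track=rewrite | github.com/Sarvdryx/futoshiki | utils/random_puzzle.py | get_candidates_mask
-- ===== SOURCE A (Python) =====
-- def get_candidates_mask(n, grid, h, v, r, c):
--     """Tính toán các giá trị khả thi bằng Bitmask (nhanh hơn vòng lặp)"""
--     if grid[r][c] != 0: return 0
--
--     # 1. Ràng buộc hàng và cột
--     used_mask = 0
--     for i in range(n):
--         if grid[r][i] != 0: used_mask |= (1 << (grid[r][i] - 1))
--         if grid[i][c] != 0: used_mask |= (1 << (grid[i][c] - 1))
--
--     candidates = ((1 << n) - 1) & ~used_mask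
--
--     # 2. Ràng buộc dấu so sánh (Cắt tỉa cực mạnh cho 9x9)
--     # LEFT
--     if c > 0 and h[r][c-1] != 0 and grid[r][c-1] != 0:
--         val_left = grid[r][c-1]
--         if h[r][c-1] == 1: candidates &= ~((1 << val_left) - 1) # cur > left
--         else: candidates &= (1 << (val_left - 1)) - 1          # cur < left
--     # RIGHT
--     if c < n-1 and h[r][c] != 0 and grid[r][c+1] != 0:
--         val_right = grid[r][c+1]
--         if h[r][c] == 1: candidates &= (1 << (val_right - 1)) - 1 # cur < right
--         else: candidates &= ~((1 << val_right) - 1)               # cur > right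
--     # UP
--     if r > 0 and v[r-1][c] != 0 and grid[r-1][c] != 0:
--         val_up = grid[r-1][c]
--         if v[r-1][c] == 1: candidates &= ~((1 << val_up) - 1) # cur > up
--         else: candidates &= (1 << (val_up - 1)) - 1           # cur < up
--     # DOWN
--     if r < n-1 and v[r][c] != 0 and grid[r+1][c] != 0:
--         val_down = grid[r+1][c]
--         if v[r][c] == 1: candidates &= (1 << (val_down - 1)) - 1 # cur < down
--         else: candidates &= ~((1 << val_down) - 1)               # cur > down
--
--     return candidates
-- ===== SOURCE B (Python) =====
-- def get_candidates_mask(n, grid, h, v, r, c):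
--     """Same result via numeric bounds: collect used values, turn the four
--     inequality constraints into lo/hi bounds, then emit bits for the values
--     in [lo, hi] that are unused."""
--     if grid[r][c] != 0:
--         return 0
--     used = set()
--     for i in range(n):
--         if grid[r][i] != 0: used.add(grid[r][i])
--         if grid[i][c] != 0: used.add(grid[i][c])
--     lo, hi = 1, n
--     if c > 0 and h[r][c-1] != 0 and grid[r][c-1] != 0:
--         if h[r][c-1] == 1: lo = max(lo, grid[r][c-1] + 1)
--         else: hi = min(hi, grid[r][c-1] - 1)
--     if c < n-1 and h[r][c] != 0 and grid[r][c+1] != 0: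
--         if h[r][c] == 1: hi = min(hi, grid[r][c+1] - 1)
--         else: lo = max(lo, grid[r][c+1] + 1)
--     if r > 0 and v[r-1][c] != 0 and grid[r-1][c] != 0:
--         if v[r-1][c] == 1: lo = max(lo, grid[r-1][c] + 1)
--         else: hi = min(hi, grid[r-1][c] - 1)
--     if r < n-1 and v[r][c] != 0 and grid[r+1][c] != 0:
--         if v[r][c] == 1: hi = min(hi, grid[r+1][c] - 1)
--         else: lo = max(lo, grid[r+1][c] + 1)
--     mask = 0
--     for val in range(lo, hi + 1):
--         if val not in used:
--             mask += 1 << (val - 1)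
--     return mask
-- ===== Notes on version B (the rewrite author's own statement) =====
-- stated objective: alternative
-- what changed: Replaces A's bit-level AND pruning (used-value bitmask, complement masks per comparison constraint) by a set of used values plus numeric lo/hi bound accumulation for the four comparison constraints, followed by a scan over the values lo..hi that sets each unused value's bit by addition.
-- outside the precondition, e.g. on get_candidates_mask(1, [[0]], [[0]], [[0]], -1, 0): A returns 1, B returns 1
import Mathlib
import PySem

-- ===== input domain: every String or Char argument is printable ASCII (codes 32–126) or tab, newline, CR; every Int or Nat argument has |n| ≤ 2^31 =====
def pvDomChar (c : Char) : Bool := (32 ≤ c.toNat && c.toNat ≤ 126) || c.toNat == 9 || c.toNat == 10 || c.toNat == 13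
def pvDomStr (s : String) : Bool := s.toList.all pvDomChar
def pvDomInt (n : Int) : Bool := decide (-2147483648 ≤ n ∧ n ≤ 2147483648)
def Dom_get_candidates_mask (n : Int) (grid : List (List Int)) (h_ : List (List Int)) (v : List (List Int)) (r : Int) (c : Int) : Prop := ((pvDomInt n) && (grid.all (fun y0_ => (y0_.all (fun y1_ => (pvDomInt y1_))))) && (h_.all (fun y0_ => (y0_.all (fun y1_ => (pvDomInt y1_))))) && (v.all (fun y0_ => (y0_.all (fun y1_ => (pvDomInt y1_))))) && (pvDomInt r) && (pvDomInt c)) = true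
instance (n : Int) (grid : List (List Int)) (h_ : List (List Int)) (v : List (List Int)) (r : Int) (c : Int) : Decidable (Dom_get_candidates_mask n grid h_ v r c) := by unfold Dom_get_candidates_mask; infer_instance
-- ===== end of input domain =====

-- B replaces A's bit-level AND pruning by numeric lo/hi bound accumulation plus a value scan (objective: alternative, same cost).
-- Shared total indexing helper: m[i][j] with Python's negative-index rule, default 0 outside (Pre_ keeps accesses in range).
def pvIdx (m : List (List Int)) (i j : Int) : Int :=
  PySem.List.pyGetD (PySem.List.pyGetD m i []) j 0

-- ===== PORT A =====
def get_candidates_mask (n : Int) (grid : List (List Int)) (h_ : List (List Int)) (v : List (List Int)) (r : Int) (c : Int) : Int :=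
  if pvIdx grid r c ≠ 0 then 0
  else
    let used_mask : Int := (PySem.List.pyRange 0 n).foldl (fun um i =>
      let um := if pvIdx grid r i ≠ 0 then PySem.Int.bor um ((1:Int) <<< (pvIdx grid r i - 1).toNat) else um
      if pvIdx grid i c ≠ 0 then PySem.Int.bor um ((1:Int) <<< (pvIdx grid i c - 1).toNat) else um) 0
    let candidates := PySem.Int.band (((1:Int) <<< n.toNat) - 1) (Int.not used_mask)
    let candidates :=
      if 0 < c ∧ pvIdx h_ r (c-1) ≠ 0 ∧ pvIdx grid r (c-1) ≠ 0 then
        let val_left := pvIdx grid r (c-1)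
        if pvIdx h_ r (c-1) = 1 then PySem.Int.band candidates (Int.not (((1:Int) <<< val_left.toNat) - 1))
        else PySem.Int.band candidates (((1:Int) <<< (val_left - 1).toNat) - 1)
      else candidates
    let candidates :=
      if c < n-1 ∧ pvIdx h_ r c ≠ 0 ∧ pvIdx grid r (c+1) ≠ 0 then
        let val_right := pvIdx grid r (c+1)
        if pvIdx h_ r c = 1 then PySem.Int.band candidates (((1:Int) <<< (val_right - 1).toNat) - 1)
        else PySem.Int.band candidates (Int.not (((1:Int) <<< val_right.toNat) - 1))
      else candidates
    let candidates :=
      if 0 < r ∧ pvIdx v (r-1) c ≠ 0 ∧ pvIdx grid (r-1) c ≠ 0 then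
        let val_up := pvIdx grid (r-1) c
        if pvIdx v (r-1) c = 1 then PySem.Int.band candidates (Int.not (((1:Int) <<< val_up.toNat) - 1))
        else PySem.Int.band candidates (((1:Int) <<< (val_up - 1).toNat) - 1)
      else candidates
    let candidates :=
      if r < n-1 ∧ pvIdx v r c ≠ 0 ∧ pvIdx grid (r+1) c ≠ 0 then
        let val_down := pvIdx grid (r+1) c
        if pvIdx v r c = 1 then PySem.Int.band candidates (((1:Int) <<< (val_down - 1).toNat) - 1)
        else PySem.Int.band candidates (Int.not (((1:Int) <<< val_down.toNat) - 1))
      else candidates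
    candidates

-- ===== PORT B =====
def get_candidates_mask_alt (n : Int) (grid : List (List Int)) (h_ : List (List Int)) (v : List (List Int)) (r : Int) (c : Int) : Int :=
  if pvIdx grid r c ≠ 0 then 0
  else
    let used : PySem.Set Int := (PySem.List.pyRange 0 n).foldl (fun s i =>
      let s := if pvIdx grid r i ≠ 0 then PySem.Set.add s (pvIdx grid r i) else s
      if pvIdx grid i c ≠ 0 then PySem.Set.add s (pvIdx grid i c) else s) (PySem.Set.ofList [])
    let lo : Int := 1
    let hi : Int := n
    let lh1 := if 0 < c ∧ pvIdx h_ r (c-1) ≠ 0 ∧ pvIdx grid r (c-1) ≠ 0 then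
        (if pvIdx h_ r (c-1) = 1 then (max lo (pvIdx grid r (c-1) + 1), hi)
         else (lo, min hi (pvIdx grid r (c-1) - 1)))
      else (lo, hi)
    let lh2 := if c < n-1 ∧ pvIdx h_ r c ≠ 0 ∧ pvIdx grid r (c+1) ≠ 0 then
        (if pvIdx h_ r c = 1 then (lh1.1, min lh1.2 (pvIdx grid r (c+1) - 1))
         else (max lh1.1 (pvIdx grid r (c+1) + 1), lh1.2))
      else lh1
    let lh3 := if 0 < r ∧ pvIdx v (r-1) c ≠ 0 ∧ pvIdx grid (r-1) c ≠ 0 then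
        (if pvIdx v (r-1) c = 1 then (max lh2.1 (pvIdx grid (r-1) c + 1), lh2.2)
         else (lh2.1, min lh2.2 (pvIdx grid (r-1) c - 1)))
      else lh2
    let lh4 := if r < n-1 ∧ pvIdx v r c ≠ 0 ∧ pvIdx grid (r+1) c ≠ 0 then
        (if pvIdx v r c = 1 then (lh3.1, min lh3.2 (pvIdx grid (r+1) c - 1))
         else (max lh3.1 (pvIdx grid (r+1) c + 1), lh3.2))
      else lh3
    (PySem.List.pyRange lh4.1 (lh4.2 + 1)).foldl (fun m val =>
      if ¬ (val ∈ used) then m + ((1:Int) <<< (val - 1).toNat) else m) 0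

-- ===== PRECONDITION & SPEC =====
-- Pre_ excludes exactly the inputs where A raises (bad shapes / negative clue values reached
-- by a shift, on which 1 << (val-1) is a ValueError) and, for the non-trivial branch (empty
-- cell), negative wraparound row/column indices, whose behaviour is an accident of Python
-- indexing; the trivial branch (a filled cell, which returns 0) is kept for all in-range
-- indices including negative ones.
def Pre_get_candidates_mask (n : Int) (grid : List (List Int)) (h_ : List (List Int)) (v : List (List Int)) (r : Int) (c : Int) : Prop :=
  (PySem.Raise.InRange grid.length r ∧
   PySem.Raise.InRange (PySem.List.pyGetD grid r []).length c ∧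
   pvIdx grid r c ≠ 0)
  ∨
  (0 ≤ r ∧ r < n ∧ 0 ≤ c ∧ c < n ∧
   n ≤ (grid.length : Int) ∧
   n ≤ ((PySem.List.pyGetD grid r []).length : Int) ∧
   (∀ i : Nat, i < n.toNat →
      c < ((PySem.List.pyGetD grid (i : Int) []).length : Int) ∧
      0 ≤ pvIdx grid r (i : Int) ∧ 0 ≤ pvIdx grid (i : Int) c) ∧
   ((0 < c ∨ c < n - 1) → (r < (h_.length : Int) ∧ n - 1 ≤ ((PySem.List.pyGetD h_ r []).length : Int))) ∧
   (0 < r → (r - 1 < (v.length : Int) ∧ c < ((PySem.List.pyGetD v (r-1) []).length : Int))) ∧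
   (r < n - 1 → (r < (v.length : Int) ∧ c < ((PySem.List.pyGetD v r []).length : Int))))
instance (n : Int) (grid : List (List Int)) (h_ : List (List Int)) (v : List (List Int)) (r : Int) (c : Int) : Decidable (Pre_get_candidates_mask n grid h_ v r c) := by unfold Pre_get_candidates_mask; infer_instance

def pvWitness_get_candidates_mask : Int × List (List Int) × List (List Int) × List (List Int) × Int × Int :=
  (2, [[0,1],[2,0]], [[1,0],[0,0]], [[0,0],[0,0]], 0, 0)

def Spec_get_candidates_mask (n : Int) (grid : List (List Int)) (h_ : List (List Int)) (v : List (List Int)) (r : Int) (c : Int) (out : Int) : Prop := out = get_candidates_mask_alt n grid h_ v r c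
instance (n : Int) (grid : List (List Int)) (h_ : List (List Int)) (v : List (List Int)) (r : Int) (c : Int) (out : Int) : Decidable (Spec_get_candidates_mask n grid h_ v r c out) := by unfold Spec_get_candidates_mask; infer_instance

-- ===== CLAIM (what is proved, stated in full; the proofs are below) =====
def Claim_equal_get_candidates_mask : Prop := ∀ (n : Int) (grid : List (List Int)) (h_ : List (List Int)) (v : List (List Int)) (r : Int) (c : Int), Dom_get_candidates_mask n grid h_ v r c → Pre_get_candidates_mask n grid h_ v r c → Spec_get_candidates_mask n grid h_ v r c (get_candidates_mask n grid h_ v r c)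

-- ===== LEMMAS AND PROOFS =====

theorem pv_int_not_eq (b : Int) : Int.not b = -b - 1 := by
  cases b with
  | ofNat m => simp [Int.not]; omega
  | negSucc m => simp [Int.not]

theorem pv_land_add_ldiff (a : ℕ) : ∀ b, (a &&& b) + Nat.ldiff a b = a := by
  induction a using Nat.binaryRec with
  | zero => intro b; simp [Nat.ldiff, Nat.bitwise_zero_left]
  | bit x a ih =>
    intro b
    conv_lhs => rw [← Nat.bit_bodd_div2 b]
    rw [Nat.land_bit x a b.bodd b.div2, Nat.ldiff_bit]
    have h := ih b.div2
    cases x <;> cases b.bodd <;> simp [Nat.bit_val] <;> omega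

theorem pv_sub_land (a b : ℕ) : a - (a &&& b) = Nat.ldiff a b := by
  have := pv_land_add_ldiff a b; omega

theorem pv_shl_one (k : Nat) : ((1:Int) <<< k : Int) = ((2^k : Nat) : Int) := by
  simp [Int.shiftLeft_eq]

theorem pv_band_not_eq {a b : Int} (ha : 0 ≤ a) (hb : 0 ≤ b) :
    PySem.Int.band a (Int.not b) = ((Nat.ldiff a.toNat b.toNat : Nat) : Int) := by
  rw [pv_int_not_eq, PySem.Int.band.eq_1]
  rw [if_pos ha, if_neg (by omega)]
  have : (-(-b - 1) - 1) = b := by ring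
  rw [this, pv_sub_land]

theorem pv_testBit_add_two_pow {a k : ℕ} (h : a < 2^k) (j : ℕ) :
    (a + 2^k).testBit j = (decide (j = k) || a.testBit j) := by
  rcases lt_trichotomy j k with hj | hj | hj
  · rw [Nat.testBit_eq_decide_div_mod_eq, Nat.testBit_eq_decide_div_mod_eq]
    have h2 : (2:ℕ)^k = 2^(k-j-1) * 2 * 2^j := by
      rw [← pow_succ]
      rw [← pow_add]
      congr 1
      omega
    have hdiv : (a + 2^k) / 2^j = a / 2^j + 2^(k-j-1) * 2 := by
      rw [h2, Nat.add_mul_div_right _ _ ((by positivity : (0:ℕ) < 2^j))]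
    rw [hdiv]
    simp [hj.ne, Nat.add_mul_mod_self_right]
  · subst hj
    have h1 : (a + 2^j) / 2^j = 1 := by
      rw [Nat.add_div_right _ ((by positivity : (0:ℕ) < 2^j)), Nat.div_eq_of_lt h]
    rw [Nat.testBit_eq_decide_div_mod_eq, h1]
    simp
  · have hlt : a + 2^k < 2^j := by
      calc a + 2^k < 2^k + 2^k := by omega
      _ = 2^(k+1) := by ring
      _ ≤ 2^j := Nat.pow_le_pow_right (by norm_num) (by omega)
    rw [Nat.testBit_lt_two_pow hlt, Nat.testBit_lt_two_pow (lt_of_lt_of_le h (Nat.pow_le_pow_right (by norm_num) (by omega)))]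
    simp; omega

-- one `used.add w` step matches one `um |= 1 << (w-1)` step, bit for bit
theorem pv_add_step {um : Int} {s : List Int} {w : Int} (hw : 1 ≤ w) (hum : 0 ≤ um)
    (h : ∀ j : ℕ, um.toNat.testBit j = decide (((j:Int)+1) ∈ s)) :
    0 ≤ PySem.Int.bor um ((1:Int) <<< (w-1).toNat) ∧
    ∀ j : ℕ, (PySem.Int.bor um ((1:Int) <<< (w-1).toNat)).toNat.testBit j
      = decide (((j:Int)+1) ∈ PySem.Set.add s w) := by
  rw [pv_shl_one, PySem.Int.bor_of_nonneg hum (by positivity)]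
  constructor
  · positivity
  · intro j
    rw [Int.toNat_natCast, Nat.testBit_lor, h j, Int.toNat_natCast, Nat.testBit_two_pow]
    have hmem := PySem.Set.mem_add s w ((j:Int)+1)
    by_cases hm : ((j:Int)+1) ∈ s <;> by_cases he : ((j:Int)+1) = w <;>
      simp [hm, he, hmem] <;> omega

theorem pv_used_fold_inv (grid : List (List Int)) (r c : Int) :
    ∀ (l : List Int), (∀ i ∈ l, 0 ≤ pvIdx grid r i ∧ 0 ≤ pvIdx grid i c) →
    ∀ (um : Int) (s : List Int), 0 ≤ um →
    (∀ j : ℕ, um.toNat.testBit j = decide (((j:Int)+1) ∈ s)) →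
    0 ≤ l.foldl (fun um i =>
        let um := if pvIdx grid r i ≠ 0 then PySem.Int.bor um ((1:Int) <<< (pvIdx grid r i - 1).toNat) else um
        if pvIdx grid i c ≠ 0 then PySem.Int.bor um ((1:Int) <<< (pvIdx grid i c - 1).toNat) else um) um ∧
    ∀ j : ℕ, (l.foldl (fun um i =>
        let um := if pvIdx grid r i ≠ 0 then PySem.Int.bor um ((1:Int) <<< (pvIdx grid r i - 1).toNat) else um
        if pvIdx grid i c ≠ 0 then PySem.Int.bor um ((1:Int) <<< (pvIdx grid i c - 1).toNat) else um) um).toNat.testBit j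
      = decide (((j:Int)+1) ∈ l.foldl (fun s i =>
          let s := if pvIdx grid r i ≠ 0 then PySem.Set.add s (pvIdx grid r i) else s
          if pvIdx grid i c ≠ 0 then PySem.Set.add s (pvIdx grid i c) else s) s) := by
  intro l
  induction l with
  | nil => intro _ um s hum h; exact ⟨hum, h⟩
  | cons i l ih =>
    intro hl um s hum h
    simp only [List.foldl_cons]
    have hi := hl i (List.mem_cons_self)
    have step1 : 0 ≤ (if pvIdx grid r i ≠ 0 then PySem.Int.bor um ((1:Int) <<< (pvIdx grid r i - 1).toNat) else um) ∧
        ∀ j : ℕ, (if pvIdx grid r i ≠ 0 then PySem.Int.bor um ((1:Int) <<< (pvIdx grid r i - 1).toNat) else um).toNat.testBit j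
          = decide (((j:Int)+1) ∈ (if pvIdx grid r i ≠ 0 then PySem.Set.add s (pvIdx grid r i) else s)) := by
      by_cases hz : pvIdx grid r i ≠ 0
      · simp only [if_pos hz]; exact pv_add_step (by omega) hum h
      · simp only [if_neg hz]; exact ⟨hum, h⟩
    set um1 := (if pvIdx grid r i ≠ 0 then PySem.Int.bor um ((1:Int) <<< (pvIdx grid r i - 1).toNat) else um) with hum1
    set s1 := (if pvIdx grid r i ≠ 0 then PySem.Set.add s (pvIdx grid r i) else s) with hs1
    have step2 : 0 ≤ (if pvIdx grid i c ≠ 0 then PySem.Int.bor um1 ((1:Int) <<< (pvIdx grid i c - 1).toNat) else um1) ∧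
        ∀ j : ℕ, (if pvIdx grid i c ≠ 0 then PySem.Int.bor um1 ((1:Int) <<< (pvIdx grid i c - 1).toNat) else um1).toNat.testBit j
          = decide (((j:Int)+1) ∈ (if pvIdx grid i c ≠ 0 then PySem.Set.add s1 (pvIdx grid i c) else s1)) := by
      by_cases hz : pvIdx grid i c ≠ 0
      · simp only [if_pos hz]
        exact pv_add_step (by omega) step1.1 step1.2
      · simp only [if_neg hz]; exact ⟨step1.1, step1.2⟩
    exact ih (fun i hi => hl i (List.mem_cons_of_mem _ hi)) _ _ step2.1 step2.2

-- the invariant carried through the four comparison constraints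
def pvPA (n : Int) (u : List Int) (x lo hi : Int) : Prop :=
  0 ≤ x ∧ 1 ≤ lo ∧ hi ≤ n ∧
  ∀ j : ℕ, x.toNat.testBit j =
    decide ((j:Int) < n ∧ ((j:Int)+1) ∉ u ∧ lo ≤ (j:Int)+1 ∧ (j:Int)+1 ≤ hi)

theorem pvPA_init {n : Int} (_hn : 1 ≤ n) (u : List Int) {um : Int} (hum : 0 ≤ um)
    (h : ∀ j : ℕ, um.toNat.testBit j = decide (((j:Int)+1) ∈ u)) :
    pvPA n u (PySem.Int.band (((1:Int) <<< n.toNat) - 1) (Int.not um)) 1 n := by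
  have h2 : (((1:Int) <<< n.toNat : Int) - 1) = ((2^n.toNat - 1 : Nat) : Int) := by
    rw [pv_shl_one]
    have : (1:Nat) ≤ 2^n.toNat := Nat.one_le_two_pow
    push_cast [this]
    ring
  rw [h2, pv_band_not_eq (by positivity) hum]
  refine ⟨by positivity, le_refl 1, le_refl n, ?_⟩
  intro j
  rw [Int.toNat_natCast, Nat.testBit_ldiff, Int.toNat_natCast, Nat.testBit_two_pow_sub_one, h j]
  simp only [← decide_not, ← Bool.decide_and, decide_eq_decide]
  by_cases hm : ((j:Int)+1) ∈ u <;> simp [hm] <;> omega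

theorem pvPA_lo {n : Int} {u : List Int} {x lo hi : Int} (w : Int) (hw : 1 ≤ w)
    (h : pvPA n u x lo hi) :
    pvPA n u (PySem.Int.band x (Int.not (((1:Int) <<< w.toNat) - 1))) (max lo (w+1)) hi := by
  obtain ⟨hx, hlo, hhi, hbit⟩ := h
  have h2 : (((1:Int) <<< w.toNat : Int) - 1) = ((2^w.toNat - 1 : Nat) : Int) := by
    rw [pv_shl_one]
    have : (1:Nat) ≤ 2^w.toNat := Nat.one_le_two_pow
    push_cast [this]
    ring
  rw [h2, pv_band_not_eq hx (by positivity)]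
  refine ⟨by positivity, by omega, hhi, ?_⟩
  intro j
  rw [Int.toNat_natCast, Nat.testBit_ldiff, Int.toNat_natCast, Nat.testBit_two_pow_sub_one, hbit j]
  simp only [← decide_not, ← Bool.decide_and, decide_eq_decide]
  by_cases hm : ((j:Int)+1) ∈ u <;> simp [hm] <;> omega

theorem pvPA_hi {n : Int} {u : List Int} {x lo hi : Int} (w : Int) (hw : 1 ≤ w)
    (h : pvPA n u x lo hi) :
    pvPA n u (PySem.Int.band x (((1:Int) <<< (w-1).toNat) - 1)) lo (min hi (w-1)) := by
  obtain ⟨hx, hlo, hhi, hbit⟩ := h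
  have h2 : (((1:Int) <<< (w-1).toNat : Int) - 1) = ((2^(w-1).toNat - 1 : Nat) : Int) := by
    rw [pv_shl_one]
    have : (1:Nat) ≤ 2^(w-1).toNat := Nat.one_le_two_pow
    push_cast [this]
    ring
  rw [h2, PySem.Int.band_of_nonneg hx (by positivity)]
  refine ⟨by positivity, hlo, by omega, ?_⟩
  intro j
  rw [Int.toNat_natCast, Nat.testBit_land, Int.toNat_natCast, Nat.testBit_two_pow_sub_one, hbit j]
  simp only [← Bool.decide_and, decide_eq_decide]
  by_cases hm : ((j:Int)+1) ∈ u <;> simp [hm] <;> omega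

theorem pvPA_stageLo {n : Int} {u : List Int} {x lo hi : Int} (G E : Prop) [Decidable G] [Decidable E]
    (w : Int) (h : pvPA n u x lo hi) (hw : G → 1 ≤ w) :
    pvPA n u
      (if G then (if E then PySem.Int.band x (Int.not (((1:Int) <<< w.toNat) - 1))
                  else PySem.Int.band x (((1:Int) <<< (w-1).toNat) - 1)) else x)
      (if G then (if E then (max lo (w+1), hi) else (lo, min hi (w-1))) else (lo, hi)).1
      (if G then (if E then (max lo (w+1), hi) else (lo, min hi (w-1))) else (lo, hi)).2 := by
  by_cases hg : G
  · by_cases he : E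
    · simp only [if_pos hg, if_pos he]; exact pvPA_lo w (hw hg) h
    · simp only [if_pos hg, if_neg he]; exact pvPA_hi w (hw hg) h
  · simp only [if_neg hg]; exact h

theorem pvPA_stageHi {n : Int} {u : List Int} {x lo hi : Int} (G E : Prop) [Decidable G] [Decidable E]
    (w : Int) (h : pvPA n u x lo hi) (hw : G → 1 ≤ w) :
    pvPA n u
      (if G then (if E then PySem.Int.band x (((1:Int) <<< (w-1).toNat) - 1)
                  else PySem.Int.band x (Int.not (((1:Int) <<< w.toNat) - 1))) else x)
      (if G then (if E then (lo, min hi (w-1)) else (max lo (w+1), hi)) else (lo, hi)).1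
      (if G then (if E then (lo, min hi (w-1)) else (max lo (w+1), hi)) else (lo, hi)).2 := by
  by_cases hg : G
  · by_cases he : E
    · simp only [if_pos hg, if_pos he]; exact pvPA_hi w (hw hg) h
    · simp only [if_pos hg, if_neg he]; exact pvPA_lo w (hw hg) h
  · simp only [if_neg hg]; exact h

theorem pv_mask_fold (u : List Int) (lo : Int) (hlo : 1 ≤ lo) :
    ∀ (t : ℕ) (hi : Int), (hi + 1 - lo).toNat = t →
    0 ≤ (PySem.List.pyRange lo (hi+1)).foldl (fun m val =>
        if ¬ (val ∈ u) then m + ((1:Int) <<< (val - 1).toNat) else m) 0 ∧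
    ∀ j : ℕ, ((PySem.List.pyRange lo (hi+1)).foldl (fun m val =>
        if ¬ (val ∈ u) then m + ((1:Int) <<< (val - 1).toNat) else m) 0).toNat.testBit j
      = decide (lo ≤ (j:Int)+1 ∧ (j:Int)+1 ≤ hi ∧ ((j:Int)+1) ∉ u) := by
  intro t
  induction t with
  | zero =>
    intro hi ht
    rw [PySem.List.pyRange_one_eq_nil (by omega)]
    refine ⟨le_refl 0, ?_⟩
    intro j
    simp only [List.foldl_nil, Int.toNat_zero, Nat.zero_testBit]
    rw [eq_comm, decide_eq_false_iff_not]
    omega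
  | succ t ih =>
    intro hi ht
    have hle : lo ≤ hi := by omega
    obtain ⟨hprev0, hprev⟩ := ih (hi - 1) (by omega)
    rw [PySem.List.pyRange_one_succ_right hle, List.foldl_append,
      show hi = (hi - 1) + 1 by ring]
    simp only [List.foldl_cons, List.foldl_nil]
    set p := (PySem.List.pyRange lo (hi - 1 + 1)).foldl (fun m val =>
        if ¬ (val ∈ u) then m + ((1:Int) <<< (val - 1).toNat) else m) 0 with hp
    have hbound : p.toNat < 2^(hi - 1 + 1 - 1).toNat := by
      apply Nat.lt_pow_two_of_testBit
      intro j hj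
      rw [hprev j, decide_eq_false_iff_not]
      intro hcontra
      omega
    by_cases hm : ((hi - 1 + 1) ∈ u)
    · rw [if_neg (by simpa using hm)]
      refine ⟨hprev0, ?_⟩
      intro j
      rw [hprev j, decide_eq_decide]
      by_cases hj : (j:Int) + 1 = hi - 1 + 1
      · constructor <;> intro hh <;> [omega; exact absurd hm (by rw [← hj] at *; exact hh.2.2)]
      · constructor <;> intro hh <;> exact ⟨hh.1, by omega, hh.2.2⟩
    · rw [if_pos (by simpa using hm)]
      have hcast : ((1:Int) <<< (hi - 1 + 1 - 1).toNat) = ((2^(hi - 1 + 1 - 1).toNat : Nat) : Int) := pv_shl_one _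
      rw [hcast]
      refine ⟨by positivity, ?_⟩
      intro j
      rw [Int.toNat_add hprev0 (by positivity), Int.toNat_natCast,
        pv_testBit_add_two_pow hbound j, hprev j]
      by_cases hj : j = (hi - 1 + 1 - 1).toNat
      · have hj' : (j:Int) + 1 = hi - 1 + 1 := by omega
        rw [show decide (j = (hi - 1 + 1 - 1).toNat) = true by simp [hj], Bool.true_or]
        symm
        rw [decide_eq_true_eq]
        exact ⟨by omega, by omega, by rw [hj']; exact hm⟩
      · simp only [hj, decide_false, Bool.false_or]
        rw [decide_eq_decide]
        constructor <;> intro hh <;> exact ⟨hh.1, by omega, hh.2.2⟩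

theorem pv_mask_fold' (u : List Int) (lo hi : Int) (hlo : 1 ≤ lo) :
    0 ≤ (PySem.List.pyRange lo (hi+1)).foldl (fun m val =>
        if ¬ (val ∈ u) then m + ((1:Int) <<< (val - 1).toNat) else m) 0 ∧
    ∀ j : ℕ, ((PySem.List.pyRange lo (hi+1)).foldl (fun m val =>
        if ¬ (val ∈ u) then m + ((1:Int) <<< (val - 1).toNat) else m) 0).toNat.testBit j
      = decide (lo ≤ (j:Int)+1 ∧ (j:Int)+1 ≤ hi ∧ ((j:Int)+1) ∉ u) :=
  pv_mask_fold u lo hlo (hi + 1 - lo).toNat hi rfl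

theorem pv_final_eq {n : Int} {u : List Int} {x lo hi res : Int}
    (hx : pvPA n u x lo hi) (hres : 0 ≤ res)
    (hchar : ∀ j : ℕ, res.toNat.testBit j = decide (lo ≤ (j:Int)+1 ∧ (j:Int)+1 ≤ hi ∧ ((j:Int)+1) ∉ u)) :
    x = res := by
  obtain ⟨hx0, hlo, hhi, hbit⟩ := hx
  rw [← Int.toNat_of_nonneg hx0, ← Int.toNat_of_nonneg hres]
  congr 1
  apply Nat.eq_of_testBit_eq
  intro j
  rw [hbit j, hchar j]
  by_cases hm : ((j:Int)+1) ∈ u <;> simp [hm] <;> omega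

-- ===== VERDICT (by name: the statement is the Claim_ definition above) =====
theorem get_candidates_mask_spec : Claim_equal_get_candidates_mask := by
  intro n grid h_ v r c _hdom hpre
  unfold Spec_get_candidates_mask
  unfold get_candidates_mask get_candidates_mask_alt
  by_cases hcell : pvIdx grid r c ≠ 0
  · rw [if_pos hcell, if_pos hcell]
  · rw [not_not] at hcell
    rw [if_neg (by simp [hcell]), if_neg (by simp [hcell])]
    rcases hpre with ⟨_, _, hne⟩ | hp
    · exact absurd hcell hne
    obtain ⟨hr0, hrn, hc0, hcn, hglen, hrowlen, hcol, _hh, _hv1, _hv2⟩ := hp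
    have hval : ∀ i : Int, 0 ≤ i → i < n → 0 ≤ pvIdx grid r i ∧ 0 ≤ pvIdx grid i c := by
      intro i hi0 hi1
      have h := hcol i.toNat (by omega)
      rw [Int.toNat_of_nonneg hi0] at h
      exact ⟨h.2.1, h.2.2⟩
    have hrange : ∀ i ∈ PySem.List.pyRange 0 n, 0 ≤ pvIdx grid r i ∧ 0 ≤ pvIdx grid i c := by
      intro i hi
      rw [PySem.List.mem_pyRange_one] at hi
      exact hval i hi.1 hi.2
    obtain ⟨huA0, huAbit⟩ := pv_used_fold_inv grid r c (PySem.List.pyRange 0 n) hrange 0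
      (PySem.Set.ofList []) (le_refl 0) (by intro j; simp)
    -- abbreviations (definitionally equal to the let-bound values in the two ports)
    set uA := (PySem.List.pyRange 0 n).foldl (fun um i =>
      let um := if pvIdx grid r i ≠ 0 then PySem.Int.bor um ((1:Int) <<< (pvIdx grid r i - 1).toNat) else um
      if pvIdx grid i c ≠ 0 then PySem.Int.bor um ((1:Int) <<< (pvIdx grid i c - 1).toNat) else um) 0 with huA
    set uB := (PySem.List.pyRange 0 n).foldl (fun s i =>
      let s := if pvIdx grid r i ≠ 0 then PySem.Set.add s (pvIdx grid r i) else s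
      if pvIdx grid i c ≠ 0 then PySem.Set.add s (pvIdx grid i c) else s) (PySem.Set.ofList []) with huB
    have h0 : pvPA n uB (PySem.Int.band (((1:Int) <<< n.toNat) - 1) (Int.not uA)) 1 n :=
      pvPA_init (by omega) uB huA0 huAbit
    have h1 := pvPA_stageLo (0 < c ∧ pvIdx h_ r (c-1) ≠ 0 ∧ pvIdx grid r (c-1) ≠ 0)
      (pvIdx h_ r (c-1) = 1) (pvIdx grid r (c-1)) h0
      (fun hg => by have := (hval (c-1) (by omega) (by omega)).1; have hne := hg.2.2; omega)
    have h2 := pvPA_stageHi (c < n-1 ∧ pvIdx h_ r c ≠ 0 ∧ pvIdx grid r (c+1) ≠ 0)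
      (pvIdx h_ r c = 1) (pvIdx grid r (c+1)) h1
      (fun hg => by have := (hval (c+1) (by omega) (by omega)).1; have hne := hg.2.2; omega)
    have h3 := pvPA_stageLo (0 < r ∧ pvIdx v (r-1) c ≠ 0 ∧ pvIdx grid (r-1) c ≠ 0)
      (pvIdx v (r-1) c = 1) (pvIdx grid (r-1) c) h2
      (fun hg => by have := (hval (r-1) (by omega) (by omega)).2; have hne := hg.2.2; omega)
    have h4 := pvPA_stageHi (r < n-1 ∧ pvIdx v r c ≠ 0 ∧ pvIdx grid (r+1) c ≠ 0)
      (pvIdx v r c = 1) (pvIdx grid (r+1) c) h3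
      (fun hg => by have := (hval (r+1) (by omega) (by omega)).2; have hne := hg.2.2; omega)
    exact pv_final_eq h4 (pv_mask_fold' uB _ _ h4.2.1).1 (pv_mask_fold' uB _ _ h4.2.1).2
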